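-- pv_equiv track=rewrite | github.com/soufuru/NLP100 | 00/06.py | word_bigram
-- ===== SOURCE A (Python) =====
-- def word_bigram(s):
--     ss = list(s)
--     lis = []
--     # 空白を削除
--     while " " in ss:
--         ss.remove(" ")
--
--     for i in range(len(ss)-1):
--         lis.append(ss[i] + ss[i+1])
--     return lis
-- ===== SOURCE B (Python) =====
-- def word_bigram(s):
--     # one pass: fuse space-filtering and bigram-building using a prev register
--     lis = []
--     prev = None
--     for c in s:
--         if c == " ":
--             continue
--         if prev is not None:
--             lis.append(prev + c)
--         prev = c
--     return lis
-- ===== Notes on version B (the rewrite author's own statement) =====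
-- stated objective: simpler
-- what changed: Replaces the repeated while-in/remove space-deletion pass plus a second index-based bigram loop with a single pass over the raw string that keeps the previous non-space character in a register, so no intermediate filtered list and no index arithmetic.
import Mathlib
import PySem

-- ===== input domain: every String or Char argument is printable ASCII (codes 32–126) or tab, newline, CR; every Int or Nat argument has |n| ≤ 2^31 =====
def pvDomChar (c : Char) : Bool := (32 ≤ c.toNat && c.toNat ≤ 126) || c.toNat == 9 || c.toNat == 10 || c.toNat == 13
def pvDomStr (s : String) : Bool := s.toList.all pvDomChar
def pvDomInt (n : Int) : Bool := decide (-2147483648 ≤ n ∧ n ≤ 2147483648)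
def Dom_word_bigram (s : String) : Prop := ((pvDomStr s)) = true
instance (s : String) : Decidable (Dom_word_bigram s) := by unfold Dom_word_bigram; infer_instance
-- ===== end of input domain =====

-- B fuses A's repeated remove-space pass and index-based bigram loop into one
-- stateful pass with a `prev` register (objective: simpler, no intermediate list).

-- ===== PORT A =====
-- `while " " in ss: ss.remove(" ")`
def pvRemoveSpaces (ss : List Char) : List Char :=
  if h : ' ' ∈ ss then
    match hr : PySem.List.remove? ss ' ' with
    | some ss' => pvRemoveSpaces ss'
    | none => ss   -- unreachable: remove? is some when the element is present
  else ss
termination_by ss.length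
decreasing_by
  have := PySem.List.remove?_eq_some_erase (xs := ss) (v := ' ') h
  rw [this] at hr
  cases hr
  exact List.length_erase_of_mem h ▸ Nat.sub_lt (List.length_pos_of_mem h) one_pos

def word_bigram (s : String) : List String :=
  let ss := pvRemoveSpaces s.toList
  (PySem.List.pyRange 0 ((ss.length : Int) - 1) 1).foldl
    (fun lis i =>
      lis ++ [String.mk [PySem.List.pyGetD ss i ' ', PySem.List.pyGetD ss (i + 1) ' ']]) []

-- ===== PORT B =====
-- single pass keeping (accumulated bigrams, last non-space char seen)
def word_bigram_alt (s : String) : List String :=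
  (s.toList.foldl
    (fun (st : List String × Option Char) c =>
      if c = ' ' then st
      else
        match st.2 with
        | some p => (st.1 ++ [String.mk [p, c]], some c)
        | none => (st.1, some c)) ([], none)).1

-- ===== PRECONDITION & SPEC =====
def Spec_word_bigram (s : String) (out : List String) : Prop := out = word_bigram_alt s
instance (s : String) (out : List String) : Decidable (Spec_word_bigram s out) := by unfold Spec_word_bigram; infer_instance

-- ===== CLAIM (what is proved, stated in full; the proofs are below) =====
def Claim_equal_word_bigram : Prop := ∀ (s : String), Dom_word_bigram s → Spec_word_bigram s (word_bigram s)

-- ===== LEMMAS AND PROOFS =====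

-- common reference: adjacent-pair bigrams of a char list
def pvBigrams : List Char → List String
  | a :: b :: t => String.mk [a, b] :: pvBigrams (b :: t)
  | _ => []

theorem pv_filter_erase (l : List Char) (h : ' ' ∈ l) :
    (l.erase ' ').filter (· ≠ ' ') = l.filter (· ≠ ' ') := by
  induction l with
  | nil => cases h
  | cons c t ih =>
    by_cases hc : c = ' '
    · subst hc; simp [List.erase_cons]
    · rw [List.erase_cons_tail (by simp [hc])]
      have ht : ' ' ∈ t := by cases h with
        | head => exact absurd rfl hc
        | tail _ h' => exact h'
      rw [List.filter_cons, List.filter_cons, ih ht]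

theorem pvRemoveSpaces_eq_filter (l : List Char) :
    pvRemoveSpaces l = l.filter (· ≠ ' ') := by
  induction l using pvRemoveSpaces.induct with
  | case1 l h ss' hr ih =>
    rw [pvRemoveSpaces, dif_pos h, hr]
    show pvRemoveSpaces ss' = _
    have he := PySem.List.remove?_eq_some_erase (xs := l) (v := ' ') h
    rw [he] at hr; cases hr
    rw [ih]; exact pv_filter_erase l h
  | case2 l h hr =>
    exfalso
    have he := PySem.List.remove?_eq_some_erase (xs := l) (v := ' ') h
    rw [he] at hr; cases hr
  | case3 l h =>
    rw [pvRemoveSpaces, dif_neg h]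
    exact (List.filter_eq_self.mpr (fun c hc => by
      simp only [ne_eq, decide_eq_true_eq]
      rintro rfl; exact h hc)).symm

theorem pv_foldl_append_map {α : Type} (g : α → String) (l : List α) (init : List String) :
    l.foldl (fun lis i => lis ++ [g i]) init = init ++ l.map g := by
  induction l generalizing init with
  | nil => simp
  | cons a t ih => simp [List.foldl_cons, ih]

theorem pv_map_range_bigrams (ss : List Char) :
    (List.range (ss.length - 1)).map
      (fun k => String.mk [ss.getD k ' ', ss.getD (k + 1) ' ']) = pvBigrams ss := by
  induction ss with
  | nil => simp [pvBigrams]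
  | cons a t ih =>
    cases t with
    | nil => simp [pvBigrams]
    | cons b t' =>
      have hlen : (a :: b :: t').length - 1 = (b :: t').length - 1 + 1 := by
        simp [List.length_cons]
      rw [hlen, List.range_succ_eq_map, List.map_cons, List.map_map]
      have hb : pvBigrams (a :: b :: t') = String.mk [a, b] :: pvBigrams (b :: t') := rfl
      rw [hb, ← ih]
      refine List.cons_eq_cons.mpr ⟨by simp, ?_⟩
      exact List.map_congr_left (fun k _ => by simp [List.getD_cons_succ])

theorem pv_A_eq_bigrams (ss : List Char) :
    (PySem.List.pyRange 0 ((ss.length : Int) - 1) 1).foldl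
      (fun lis i =>
        lis ++ [String.mk [PySem.List.pyGetD ss i ' ', PySem.List.pyGetD ss (i + 1) ' ']]) []
      = pvBigrams ss := by
  rw [PySem.List.pyRange_one, pv_foldl_append_map, List.nil_append, List.map_map,
    ← pv_map_range_bigrams ss]
  have hlen : ((ss.length : Int) - 1 - 0).toNat = ss.length - 1 := by omega
  rw [hlen]
  apply List.map_congr_left
  intro k _
  have h0 : (0 : Int) + (k : Int) = (k : Int) := by ring
  have h1 : ((k : Int)) + 1 = ((k + 1 : Nat) : Int) := by push_cast; ring
  simp only [Function.comp, h0, h1, PySem.List.pyGetD_natCast]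

theorem pv_B_some (l : List Char) (p : Char) (acc : List String) :
    (l.foldl
      (fun (st : List String × Option Char) c =>
        if c = ' ' then st
        else
          match st.2 with
          | some q => (st.1 ++ [String.mk [q, c]], some c)
          | none => (st.1, some c)) (acc, some p)).1
      = acc ++ pvBigrams (p :: l.filter (· ≠ ' ')) := by
  induction l generalizing p acc with
  | nil => simp [pvBigrams]
  | cons c t ih =>
    by_cases hc : c = ' '
    · subst hc; simpa using ih p acc
    · simp only [List.foldl_cons, if_neg hc, List.filter_cons,
        show (decide (c ≠ ' ')) = true by simpa using hc, if_pos]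
      rw [ih c (acc ++ [String.mk [p, c]])]
      simp [pvBigrams]

theorem pv_B_none (l : List Char) (acc : List String) :
    (l.foldl
      (fun (st : List String × Option Char) c =>
        if c = ' ' then st
        else
          match st.2 with
          | some q => (st.1 ++ [String.mk [q, c]], some c)
          | none => (st.1, some c)) (acc, none)).1
      = acc ++ pvBigrams (l.filter (· ≠ ' ')) := by
  induction l generalizing acc with
  | nil => simp [pvBigrams]
  | cons c t ih =>
    by_cases hc : c = ' '
    · subst hc; simpa using ih acc
    · simp only [List.foldl_cons, if_neg hc, List.filter_cons,
        show (decide (c ≠ ' ')) = true by simpa using hc, if_pos]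
      rw [pv_B_some t c acc]

-- ===== VERDICT (by name: the statement is the Claim_ definition above) =====
theorem word_bigram_spec : Claim_equal_word_bigram := by
  intro s _
  unfold Spec_word_bigram word_bigram word_bigram_alt
  rw [pvRemoveSpaces_eq_filter, pv_A_eq_bigrams, pv_B_none, List.nil_append]
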